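-- pv_equiv track=rewrite | github.com/himatts/LimePipeline | lime_pipeline/ops/ops_ai_asset_organizer.py | _path_has_inactive_ancestor
-- ===== SOURCE A (Python) =====
-- from typing import Any, Dict, Iterable, List, Optional, Sequence, Tuple
--
-- def _path_has_inactive_ancestor(
--     path: str,
--     inactive_paths_norm: set[str],
--     inactive_names_norm: Optional[set[str]] = None,
-- ) -> bool:
--     """Return True when path references any known inactive collection segment path."""
--     raw = (path or "").strip()
--     if not raw:
--         return False
--     parts = [p for p in raw.split("/") if p]
--     if not parts:
--         return False
--     current = ""
--     for segment in parts:
--         current = segment if not current else f"{current}/{segment}"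
--         if current.lower() in inactive_paths_norm:
--             return True
--         if inactive_names_norm and segment.lower() in inactive_names_norm:
--             return True
--     return False
-- ===== SOURCE B (Python) =====
-- from typing import Optional
--
--
-- def _path_has_inactive_ancestor(
--     path: str,
--     inactive_paths_norm: set[str],
--     inactive_names_norm: Optional[set[str]] = None,
-- ) -> bool:
--     """Return True when path references any known inactive collection segment path."""
--     parts = [p for p in (path or "").strip().split("/") if p]
--     if not parts:
--         return False
--     # Scan the inactive sets against one normalised string instead of
--     # generating every prefix of the path: q names an ancestor of the path
--     # exactly when q equals the whole normalised path or q + "/" starts it.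
--     low = "/".join(parts).lower()
--     if any(q == low or low.startswith(q + "/") for q in inactive_paths_norm):
--         return True
--     if not inactive_names_norm:
--         return False
--     parts_low = [p.lower() for p in parts]
--     return any(n in parts_low for n in inactive_names_norm)
-- ===== Notes on version B (the rewrite author's own statement) =====
-- stated objective: alternative
-- what changed: Inverts the iteration: instead of walking the path's segments, growing a 'current' prefix and looking each prefix/segment up in the sets, B normalises the path once into one joined lowercase string and scans the inactive sets, deciding each candidate by a string prefix test (q == low or low.startswith(q + '/')) and each name by membership in the lowered segment list.
import Mathlib
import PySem

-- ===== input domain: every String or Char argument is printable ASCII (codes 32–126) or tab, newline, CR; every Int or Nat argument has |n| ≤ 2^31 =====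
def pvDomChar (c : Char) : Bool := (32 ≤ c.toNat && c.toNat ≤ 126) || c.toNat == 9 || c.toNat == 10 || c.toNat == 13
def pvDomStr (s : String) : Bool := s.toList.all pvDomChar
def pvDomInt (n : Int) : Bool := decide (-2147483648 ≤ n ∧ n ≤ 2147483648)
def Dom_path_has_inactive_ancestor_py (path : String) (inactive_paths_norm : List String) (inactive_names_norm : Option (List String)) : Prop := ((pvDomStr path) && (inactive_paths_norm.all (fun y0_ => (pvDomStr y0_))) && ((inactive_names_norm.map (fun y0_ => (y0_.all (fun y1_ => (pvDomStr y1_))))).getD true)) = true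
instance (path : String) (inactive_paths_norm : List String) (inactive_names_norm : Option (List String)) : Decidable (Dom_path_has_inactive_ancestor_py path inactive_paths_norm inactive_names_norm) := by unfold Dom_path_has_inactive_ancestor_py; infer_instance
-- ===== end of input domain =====

-- B scans the inactive sets against one normalised joined string (prefix test / membership in
-- the lowered segment list) instead of walking the path's segments growing a current prefix;
-- objective: alternative decomposition, same exact return value.


-- ===== PORT A =====
-- the for-loop with its two early returns, carrying the growing `current`
def aLoop (paths : List String) (names : Option (List String)) : String → List String → Bool
  | _, [] => false
  | current, seg :: rest =>
    let current := if current == "" then seg else current ++ "/" ++ seg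
    if paths.contains (PySem.Str.lower current) then true
    else if (match names with
             | none => false
             | some ns => !ns.isEmpty && ns.contains (PySem.Str.lower seg)) then true
    else aLoop paths names current rest

def path_has_inactive_ancestor_py (path : String) (inactive_paths_norm : List String) (inactive_names_norm : Option (List String)) : Bool :=
  let raw := PySem.Str.strip path
  if raw == "" then false
  else
    -- raw.split("/"): split? is none only for sep = ""; the separator here is "/"
    let parts := ((PySem.Str.split? raw "/").getD []).filter (fun p => !(p == ""))
    if parts.isEmpty then false
    else aLoop inactive_paths_norm inactive_names_norm "" parts

-- ===== PORT B =====
def path_has_inactive_ancestor_py_alt (path : String) (inactive_paths_norm : List String) (inactive_names_norm : Option (List String)) : Bool :=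
  -- (path or "").strip().split("/"): split? is none only for sep = ""
  let parts := ((PySem.Str.split? (PySem.Str.strip path) "/").getD []).filter (fun p => !(p == ""))
  if parts.isEmpty then false
  else
    let low := PySem.Str.lower (PySem.Str.join "/" parts)
    if inactive_paths_norm.any (fun q => q == low || PySem.Str.startswith low (q ++ "/")) then true
    else
      match inactive_names_norm with
      | none => false
      | some ns =>
        if ns.isEmpty then false
        else
          let parts_low := parts.map PySem.Str.lower
          ns.any (fun n => parts_low.contains n)

-- ===== PRECONDITION & SPEC =====
def Spec_path_has_inactive_ancestor_py (path : String) (inactive_paths_norm : List String) (inactive_names_norm : Option (List String)) (out : Bool) : Prop := out = path_has_inactive_ancestor_py_alt path inactive_paths_norm inactive_names_norm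
instance (path : String) (inactive_paths_norm : List String) (inactive_names_norm : Option (List String)) (out : Bool) : Decidable (Spec_path_has_inactive_ancestor_py path inactive_paths_norm inactive_names_norm out) := by unfold Spec_path_has_inactive_ancestor_py; infer_instance

-- ===== CLAIM (what is proved, stated in full; the proofs are below) =====
def Claim_equal_path_has_inactive_ancestor_py : Prop := ∀ (path : String) (inactive_paths_norm : List String) (inactive_names_norm : Option (List String)), Dom_path_has_inactive_ancestor_py path inactive_paths_norm inactive_names_norm → Spec_path_has_inactive_ancestor_py path inactive_paths_norm inactive_names_norm (path_has_inactive_ancestor_py path inactive_paths_norm inactive_names_norm)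

-- ===== LEMMAS AND PROOFS =====


-- proof helpers: a fuel-free description of split("/"), prefix-join lists, and the
-- characterisation of "q is a normalised ancestor prefix" as a string prefix test

def pvSplitAux : List Char → List Char → List (List Char)
  | cur, [] => [cur]
  | cur, c :: rest => if c = '/' then cur :: pvSplitAux [] rest else pvSplitAux (cur ++ [c]) rest

lemma pv_go_eq : ∀ (fuel : Nat) (l cur acc : _), l.length < fuel →
    PySem.Chars.splitOn.go ['/'] fuel l cur acc = acc.reverse ++ pvSplitAux cur.reverse l := by
  intro fuel
  induction fuel with
  | zero => intro l cur acc h; omega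
  | succ n ih =>
    intro l cur acc h
    cases l with
    | nil => simp [PySem.Chars.splitOn.go, pvSplitAux]
    | cons c rest =>
      simp only [PySem.Chars.splitOn.go]
      by_cases hc : c = '/'
      · subst hc
        rw [if_pos (by simp [List.isPrefixOf])]
        rw [ih _ _ _ (by simp at h ⊢; omega)]
        simp [pvSplitAux]
      · rw [if_neg (by simp [List.isPrefixOf]; exact fun hcc => absurd hcc.symm hc)]
        rw [ih _ _ _ (by simp at h ⊢; omega)]
        simp [pvSplitAux, hc]

lemma pv_splitOn_eq (s : List Char) : PySem.Chars.splitOn s ['/'] = pvSplitAux [] s := by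
  have := pv_go_eq (s.length + 1) s [] [] (by omega)
  simpa [PySem.Chars.splitOn] using this

lemma pv_splitAux_sep_free : ∀ (l cur : List Char), '/' ∉ cur →
    ∀ p ∈ pvSplitAux cur l, '/' ∉ p := by
  intro l
  induction l with
  | nil => intro cur hc p hp; simp [pvSplitAux] at hp; subst hp; exact hc
  | cons c rest ih =>
    intro cur hc p hp
    simp only [pvSplitAux] at hp
    by_cases h : c = '/'
    · rw [if_pos h] at hp
      rcases List.mem_cons.mp hp with rfl | hp
      · exact hc
      · exact ih [] (by simp) p hp
    · rw [if_neg h] at hp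
      exact ih (cur ++ [c]) (by simp [hc]; exact fun hcc => absurd hcc.symm h) p hp

lemma pv_mem_splitOn_sep_free {s p : List Char} (hp : p ∈ PySem.Chars.splitOn s ['/']) :
    '/' ∉ p := by
  rw [pv_splitOn_eq] at hp
  exact pv_splitAux_sep_free s [] (by simp) p hp

lemma pv_lowerChar_eq_slash {c : Char} (h : PySem.Chars.lowerChar c = '/') : c = '/' := by
  unfold PySem.Chars.lowerChar PySem.Chars.isupper at h
  split_ifs at h with hu
  · exfalso
    simp only [Bool.and_eq_true, decide_eq_true_eq] at hu
    have h1 : 65 ≤ c.toNat := by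
      have h3 := UInt32.le_iff_toNat_le.mp (Char.le_def.mp hu.1)
      have e : ('A').val.toNat = 65 := by decide
      rw [e] at h3; exact h3
    have h2 : c.toNat ≤ 90 := by
      have h3 := UInt32.le_iff_toNat_le.mp (Char.le_def.mp hu.2)
      have e : ('Z').val.toNat = 90 := by decide
      rw [e] at h3; exact h3
    have h3 : (Char.ofNat (c.toNat + 32)).toNat = 47 := by rw [h]; decide
    rw [Char.toNat_ofNat] at h3
    have hv : (c.toNat + 32).isValidChar := Or.inl (by omega)
    rw [if_pos hv] at h3
    omega
  · exact h

lemma pv_lower_sep_free {cs : List Char} (h : '/' ∉ cs) : '/' ∉ PySem.Chars.lower cs := by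
  unfold PySem.Chars.lower
  intro hm
  obtain ⟨c, hc, he⟩ := List.mem_map.mp hm
  exact h ((pv_lowerChar_eq_slash he) ▸ hc)

lemma pv_lower_ne_nil {cs : List Char} (h : cs ≠ []) : PySem.Chars.lower cs ≠ [] := by
  simp [PySem.Chars.lower, h]

lemma pv_lower_append (a b : List Char) :
    PySem.Chars.lower (a ++ b) = PySem.Chars.lower a ++ PySem.Chars.lower b := by
  simp [PySem.Chars.lower]

lemma pv_lower_join : ∀ (M : List (List Char)),
    PySem.Chars.lower (PySem.Chars.join ['/'] M) = PySem.Chars.join ['/'] (M.map PySem.Chars.lower) := by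
  intro M
  induction M with
  | nil => simp [PySem.Chars.join_nil, PySem.Chars.lower]
  | cons p M ih =>
    cases M with
    | nil => simp [PySem.Chars.join_singleton]
    | cons q r =>
      rw [PySem.Chars.join_cons_cons, pv_lower_append, pv_lower_append, ih]
      simp only [List.map_cons]
      rw [PySem.Chars.join_cons_cons, show PySem.Chars.lower ['/'] = ['/'] from by decide]

def pvPjC : List Char → List (List Char) → List (List Char)
  | _, [] => []
  | cur, s :: r =>
    (if cur = [] then s else cur ++ '/' :: s) :: pvPjC (if cur = [] then s else cur ++ '/' :: s) r

lemma pvPjC_shift : ∀ (L : List (List Char)), (∀ p ∈ L, p ≠ []) → ∀ (cur : List Char), cur ≠ [] →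
    pvPjC cur L = (pvPjC [] L).map (fun t => cur ++ '/' :: t) := by
  intro L
  induction L with
  | nil => intro _ cur _; simp [pvPjC]
  | cons s r ih =>
    intro hne cur hcur
    have hs : s ≠ [] := hne s (by simp)
    rw [show pvPjC cur (s::r) = (cur ++ '/' :: s) :: pvPjC (cur ++ '/' :: s) r from by
      simp [pvPjC, if_neg hcur]]
    rw [show pvPjC [] (s::r) = s :: pvPjC s r from by simp [pvPjC]]
    have h1 : pvPjC (cur ++ '/' :: s) r = (pvPjC [] r).map (fun t => (cur ++ '/' :: s) ++ '/' :: t) :=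
      ih (fun p hp => hne p (by simp [hp])) _ (by simp)
    have h2 : pvPjC s r = (pvPjC [] r).map (fun t => s ++ '/' :: t) :=
      ih (fun p hp => hne p (by simp [hp])) s hs
    rw [h1, h2, List.map_cons, List.map_map]
    congr 1
    apply List.map_congr_left
    intro t _
    simp

lemma pv_prefix_split {q s w : List Char} (hs : s ≠ []) (hfree : '/' ∉ s) :
    ((q ++ ['/']) <+: s ++ '/' :: w) ↔ (q = s ∨ ∃ t, q = s ++ '/' :: t ∧ (t ++ ['/']) <+: w) := by
  have hrw : s ++ '/' :: w = (s ++ ['/']) ++ w := by simp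
  rw [hrw]
  constructor
  · intro h
    have h2 : s ++ ['/'] <+: (s ++ ['/']) ++ w := List.prefix_append _ _
    rcases List.prefix_or_prefix_of_prefix h h2 with hqs | hsq
    · by_cases hlen : q.length = s.length
      · left
        have heq : q ++ ['/'] = s ++ ['/'] := hqs.eq_of_length (by simp [hlen])
        simpa using heq
      · exfalso
        have hle : (q ++ ['/']).length ≤ s.length := by
          have := hqs.length_le; simp at this ⊢; omega
        have hps : q ++ ['/'] <+: s :=
          List.prefix_of_prefix_length_le hqs (List.prefix_append s ['/']) hle
        exact hfree (hps.subset (by simp))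
    · by_cases hlen : q.length = s.length
      · left
        have heq : s ++ ['/'] = q ++ ['/'] := hsq.eq_of_length (by simp [hlen])
        have := (by simpa using heq : s = q)
        exact this.symm
      · right
        have hle : (s ++ ['/']).length ≤ q.length := by
          have := hsq.length_le; simp at this ⊢; omega
        have hps : s ++ ['/'] <+: q :=
          List.prefix_of_prefix_length_le hsq (List.prefix_append q ['/']) hle
        obtain ⟨t, ht⟩ := hps
        refine ⟨t, by simp [← ht], ?_⟩
        have : (s ++ ['/']) ++ (t ++ ['/']) <+: (s ++ ['/']) ++ w := by
          have hq : q ++ ['/'] = (s ++ ['/']) ++ (t ++ ['/']) := by simp [← ht]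
          rwa [hq] at h
        exact (List.prefix_append_right_inj _).mp this
  · rintro (rfl | ⟨t, rfl, ht⟩)
    · exact List.prefix_append _ _
    · have : (s ++ '/' :: t) ++ ['/'] = (s ++ ['/']) ++ (t ++ ['/']) := by simp
      rw [this]
      exact (List.prefix_append_right_inj _).mpr ht

lemma pv_pjC_mem_iff : ∀ (L : List (List Char)), (∀ p ∈ L, p ≠ [] ∧ '/' ∉ p) → ∀ q : List Char,
    (q ∈ pvPjC [] L ↔
      L ≠ [] ∧ (q = PySem.Chars.join ['/'] L ∨ (q ++ ['/']) <+: PySem.Chars.join ['/'] L)) := by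
  intro L
  induction L with
  | nil => intro _ q; simp [pvPjC]
  | cons s r ih =>
    intro hf q
    have hs : s ≠ [] := (hf s (by simp)).1
    have hsf : '/' ∉ s := (hf s (by simp)).2
    have hfr : ∀ p ∈ r, p ≠ [] ∧ '/' ∉ p := fun p hp => hf p (by simp [hp])
    rw [show pvPjC [] (s::r) = s :: pvPjC s r from by simp [pvPjC]]
    cases r with
    | nil =>
      rw [PySem.Chars.join_singleton]
      constructor
      · intro hq
        simp [pvPjC] at hq
        exact ⟨by simp, Or.inl hq⟩
      · rintro ⟨-, rfl | hpre⟩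
        · simp [pvPjC]
        · exact absurd (hpre.subset (by simp)) hsf
    | cons a r' =>
      rw [PySem.Chars.join_cons_cons]
      have hw : s ++ ['/'] ++ PySem.Chars.join ['/'] (a :: r')
          = s ++ '/' :: PySem.Chars.join ['/'] (a :: r') := by simp
      rw [hw]
      rw [pvPjC_shift (a :: r') (fun p hp => (hfr p hp).1) s hs]
      rw [pv_prefix_split hs hsf]
      constructor
      · intro hq
        rcases List.mem_cons.mp hq with rfl | hq
        · exact ⟨by simp, Or.inr (Or.inl rfl)⟩
        · obtain ⟨t, ht, rfl⟩ := List.mem_map.mp hq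
          rcases ((ih hfr t).mp ht).2 with rfl | hpre
          · exact ⟨by simp, Or.inl rfl⟩
          · exact ⟨by simp, Or.inr (Or.inr ⟨t, rfl, hpre⟩)⟩
      · rintro ⟨-, rfl | (rfl | ⟨t, rfl, hpre⟩)⟩
        · exact List.mem_cons_of_mem _ (List.mem_map.mpr
            ⟨PySem.Chars.join ['/'] (a :: r'), ((ih hfr _).mpr ⟨by simp, Or.inl rfl⟩), rfl⟩)
        · exact List.mem_cons_self ..
        · exact List.mem_cons_of_mem _ (List.mem_map.mpr
            ⟨t, ((ih hfr t).mpr ⟨by simp, Or.inr hpre⟩), rfl⟩)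

def pvPj : String → List String → List String
  | _, [] => []
  | cur, s :: r =>
    (if cur == "" then s else cur ++ "/" ++ s) :: pvPj (if cur == "" then s else cur ++ "/" ++ s) r

lemma pv_pj_map : ∀ (l : List String) (cur : String),
    (pvPj cur l).map (fun c => PySem.Chars.lower c.toList)
      = pvPjC (PySem.Chars.lower cur.toList) (l.map (fun s => PySem.Chars.lower s.toList)) := by
  intro l
  induction l with
  | nil => intro cur; simp [pvPj, pvPjC]
  | cons s r ih =>
    intro cur
    by_cases hc : cur = ""
    · subst hc
      rw [show pvPj "" (s::r) = s :: pvPj s r from by simp [pvPj]]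
      rw [show ("" : String).toList = [] from rfl]
      rw [show PySem.Chars.lower [] = [] from rfl]
      rw [show pvPjC [] ((s::r).map (fun s => PySem.Chars.lower s.toList))
          = PySem.Chars.lower s.toList
            :: pvPjC (PySem.Chars.lower s.toList) (r.map (fun s => PySem.Chars.lower s.toList))
        from by simp [pvPjC]]
      rw [List.map_cons, ih s]
    · have hbe : (cur == "") = false := by simp [hc]
      have hcl : PySem.Chars.lower cur.toList ≠ [] := by
        apply pv_lower_ne_nil
        intro hnil
        exact hc (String.toList_inj.mp (by simp [hnil]))
      rw [show pvPj cur (s::r) = (cur ++ "/" ++ s) :: pvPj (cur ++ "/" ++ s) r from by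
        simp [pvPj, hbe]]
      rw [show ((s::r).map (fun s => PySem.Chars.lower s.toList))
          = PySem.Chars.lower s.toList :: (r.map (fun s => PySem.Chars.lower s.toList)) from by simp]
      rw [show pvPjC (PySem.Chars.lower cur.toList)
            (PySem.Chars.lower s.toList :: (r.map (fun s => PySem.Chars.lower s.toList)))
          = (PySem.Chars.lower cur.toList ++ '/' :: PySem.Chars.lower s.toList)
            :: pvPjC (PySem.Chars.lower cur.toList ++ '/' :: PySem.Chars.lower s.toList)
                 (r.map (fun s => PySem.Chars.lower s.toList)) from by
        simp [pvPjC, if_neg hcl]]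
      rw [List.map_cons, ih (cur ++ "/" ++ s)]
      have htl : PySem.Chars.lower (cur ++ "/" ++ s).toList
          = PySem.Chars.lower cur.toList ++ '/' :: PySem.Chars.lower s.toList := by
        rw [String.toList_append, String.toList_append, pv_lower_append, pv_lower_append,
          show PySem.Chars.lower ("/".toList) = ['/'] from by decide]
        simp
      rw [htl]

lemma pv_bool_step (P Q X F Y : Bool) :
    (if P then true else if F && Q then true else (X || (F && Y)))
      = ((P || X) || (F && (Q || Y))) := by
  cases P <;> cases Q <;> cases X <;> cases F <;> cases Y <;> rfl

lemma pv_names_flag (names : Option (List String)) (x : String) :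
    (match names with | none => false | some ns => !ns.isEmpty && ns.contains x)
      = ((match names with | none => false | some ns => !ns.isEmpty)
          && (names.getD []).contains x) := by
  cases names <;> simp

lemma pv_aLoop_spec (paths : List String) (names : Option (List String)) :
    ∀ (l : List String) (cur : String),
      aLoop paths names cur l
        = ((pvPj cur l).any (fun c => paths.contains (PySem.Str.lower c))
            || ((match names with | none => false | some ns => !ns.isEmpty)
                && l.any (fun s => (names.getD []).contains (PySem.Str.lower s)))) := by
  intro l
  induction l with
  | nil => intro cur; simp [aLoop, pvPj]
  | cons s r ih =>
    intro cur
    simp only [aLoop, pvPj]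
    rw [pv_names_flag names (PySem.Str.lower s), ih]
    rw [List.any_cons, List.any_cons]
    exact pv_bool_step _ _ _ _ _

lemma pv_names_eq (ns : List String) (parts : List String) :
    parts.any (fun s => ns.contains (PySem.Str.lower s))
      = ns.any (fun n => (parts.map PySem.Str.lower).contains n) := by
  rw [Bool.eq_iff_iff]
  simp only [List.any_eq_true, List.contains_iff_mem]
  constructor
  · rintro ⟨s, hs, hm⟩
    exact ⟨_, hm, List.mem_map_of_mem hs⟩
  · rintro ⟨n, hn, hm⟩
    obtain ⟨s, hs, rfl⟩ := List.mem_map.mp hm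
    exact ⟨s, hs, hn⟩

lemma pv_paths_eq (paths parts : List String)
    (hf : ∀ p ∈ parts, p.toList ≠ [] ∧ '/' ∉ p.toList) (hne : parts ≠ []) :
    (pvPj "" parts).any (fun c => paths.contains (PySem.Str.lower c))
      = paths.any (fun q => q == PySem.Str.lower (PySem.Str.join "/" parts)
          || PySem.Str.startswith (PySem.Str.lower (PySem.Str.join "/" parts)) (q ++ "/")) := by
  have hlow : (PySem.Str.lower (PySem.Str.join "/" parts)).toList
      = PySem.Chars.join ['/'] (parts.map (fun s => PySem.Chars.lower s.toList)) := by
    rw [PySem.Str.toList_lower, PySem.Str.toList_join,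
      show ("/" : String).toList = ['/'] from rfl, pv_lower_join, List.map_map]
    rfl
  have hfL : ∀ p ∈ parts.map (fun s => PySem.Chars.lower s.toList), p ≠ [] ∧ '/' ∉ p := by
    intro p hp
    obtain ⟨s, hs, rfl⟩ := List.mem_map.mp hp
    exact ⟨pv_lower_ne_nil (hf s hs).1, pv_lower_sep_free (hf s hs).2⟩
  have hLne : parts.map (fun s => PySem.Chars.lower s.toList) ≠ [] := by simp [hne]
  rw [Bool.eq_iff_iff]
  simp only [List.any_eq_true, List.contains_iff_mem, Bool.or_eq_true, beq_iff_eq]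
  constructor
  · rintro ⟨c, hc, hm⟩
    refine ⟨PySem.Str.lower c, hm, ?_⟩
    have hmem : (PySem.Str.lower c).toList
        ∈ pvPjC [] (parts.map (fun s => PySem.Chars.lower s.toList)) := by
      rw [PySem.Str.toList_lower]
      have h1 : PySem.Chars.lower c.toList
          ∈ (pvPj "" parts).map (fun c => PySem.Chars.lower c.toList) :=
        List.mem_map_of_mem hc
      rw [pv_pj_map] at h1
      exact h1
    have hiff := (pv_pjC_mem_iff _ hfL _).mp hmem
    rcases hiff.2 with he | hpre
    · left
      apply String.toList_inj.mp
      rw [hlow, ← he]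
    · right
      rw [PySem.Str.startswith_eq]
      apply (PySem.Chars.startswith_iff _ _).mpr
      rw [String.toList_append, show ("/" : String).toList = ['/'] from rfl, hlow]
      exact hpre
  · rintro ⟨q, hq, he | hpre⟩
    all_goals
      have hqt : q.toList ∈ pvPjC [] (parts.map (fun s => PySem.Chars.lower s.toList)) := by
        apply (pv_pjC_mem_iff _ hfL _).mpr
        refine ⟨hLne, ?_⟩
        first
        | · exact Or.inl (by rw [← hlow, he])
        | · refine Or.inr ?_
            rw [PySem.Str.startswith_eq] at hpre
            have h2 := (PySem.Chars.startswith_iff _ _).mp hpre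
            rwa [String.toList_append, show ("/" : String).toList = ['/'] from rfl, hlow] at h2
    all_goals
      have h2 : q.toList ∈ (pvPj "" parts).map (fun c => PySem.Chars.lower c.toList) := by
        rw [pv_pj_map]; exact hqt
      obtain ⟨c, hc, hct⟩ := List.mem_map.mp h2
      refine ⟨c, hc, ?_⟩
      have hlc : PySem.Str.lower c = q :=
        String.toList_inj.mp (by rw [PySem.Str.toList_lower, hct])
      rw [hlc]
      exact hq

lemma pv_b_shape (PA : Bool) (names : Option (List String)) (f : String → Bool) :
    (if PA then true
     else match names with
          | none => false
          | some ns => if ns.isEmpty then false else ns.any f)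
      = (PA || ((match names with | none => false | some ns => !ns.isEmpty)
          && (names.getD []).any f)) := by
  cases names with
  | none => cases PA <;> simp
  | some ns =>
    cases PA
    · cases hn : ns.isEmpty
      · simp [hn]
      · simp [List.isEmpty_iff.mp hn]
    · simp

-- ===== VERDICT (by name: the statement is the Claim_ definition above) =====
theorem path_has_inactive_ancestor_py_spec : Claim_equal_path_has_inactive_ancestor_py := by
  unfold Claim_equal_path_has_inactive_ancestor_py
  intro path paths names _
  unfold Spec_path_has_inactive_ancestor_py
  unfold path_has_inactive_ancestor_py path_has_inactive_ancestor_py_alt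
  simp only []
  by_cases h0 : PySem.Str.strip path == ""
  · have hr : PySem.Str.strip path = "" := by simpa using h0
    rw [if_pos h0, hr]
    rw [show ((PySem.Str.split? ("" : String) "/").getD []).filter (fun p => !(p == "")) = []
      from by decide]
    simp
  · rw [if_neg h0]
    have hfacts : ∀ p ∈ ((PySem.Str.split? (PySem.Str.strip path) "/").getD []).filter
        (fun p => !(p == "")), p.toList ≠ [] ∧ '/' ∉ p.toList := by
      intro p hp
      have hp1 := List.mem_filter.mp hp
      constructor
      · intro hnil
        have : p = "" := String.toList_inj.mp (by rw [hnil]; rfl)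
        simp [this] at hp1
      · -- p comes from split? of the stripped path; its pieces never contain '/'
        have hsm := PySem.Str.split?_map (PySem.Str.strip path) "/"
        rw [show ("/" : String).toList = ['/'] from rfl] at hsm
        rw [show PySem.Chars.split? (PySem.Str.strip path).toList ['/']
            = some (PySem.Chars.splitOn (PySem.Str.strip path).toList ['/']) from by
          simp [PySem.Chars.split?]] at hsm
        cases hsp : PySem.Str.split? (PySem.Str.strip path) "/" with
        | none => rw [hsp] at hsm; simp at hsm
        | some l0 =>
          rw [hsp] at hsm
          simp only [Option.map_some, Option.some.injEq] at hsm
          have hpl0 : p ∈ l0 := by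
            have := hp1.1
            rwa [hsp] at this
          have : p.toList ∈ PySem.Chars.splitOn (PySem.Str.strip path).toList ['/'] := by
            rw [← hsm]
            exact List.mem_map_of_mem hpl0
          exact pv_mem_splitOn_sep_free this
    cases hpe : (((PySem.Str.split? (PySem.Str.strip path) "/").getD []).filter
        (fun p => !(p == ""))).isEmpty
    · rw [pv_aLoop_spec, pv_paths_eq _ _ hfacts (by simpa using hpe),
        pv_names_eq (names.getD []) _, pv_b_shape]
    · simp
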